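-- pv_equiv track=rewrite | github.com/capt-clay10/GeoCamPal | repo/src/utils.py | _clean_module_name
-- ===== SOURCE A (Python) =====
-- def _clean_module_name(module_name: str) -> str:
--     text = (module_name or "settings").strip().lower()
--     cleaned = []
--     prev_sep = False
--     for ch in text:
--         if ch.isalnum():
--             cleaned.append(ch)
--             prev_sep = False
--         else:
--             if not prev_sep:
--                 cleaned.append("_")
--             prev_sep = True
--     name = "".join(cleaned).strip("_")
--     return name or "settings"
-- ===== SOURCE B (Python) =====
-- def _clean_module_name(module_name: str) -> str:
--     text = (module_name or "settings").strip().lower()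
--     tokens = "".join(ch if ch.isalnum() else " " for ch in text).split()
--     return "_".join(tokens) or "settings"
-- ===== Notes on version B (the rewrite author's own statement) =====
-- stated objective: simpler
-- what changed: A's character loop with a prev_sep flag plus a final underscore strip is replaced by masking non-alphanumerics to spaces, splitting on whitespace and joining the tokens with underscores.
import Mathlib
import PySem

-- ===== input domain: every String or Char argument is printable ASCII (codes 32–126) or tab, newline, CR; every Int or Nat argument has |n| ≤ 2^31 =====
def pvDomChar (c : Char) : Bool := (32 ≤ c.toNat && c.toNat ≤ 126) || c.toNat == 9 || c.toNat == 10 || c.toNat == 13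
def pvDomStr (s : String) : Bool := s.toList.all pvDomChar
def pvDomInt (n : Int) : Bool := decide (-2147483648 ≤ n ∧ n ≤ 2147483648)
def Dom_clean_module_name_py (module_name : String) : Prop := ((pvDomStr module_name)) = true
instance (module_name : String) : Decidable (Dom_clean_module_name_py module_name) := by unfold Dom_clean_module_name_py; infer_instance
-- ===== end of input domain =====

-- B replaces A's prev_sep flag loop and final strip('_') by masking non-alphanumerics to
-- spaces, splitting on whitespace and joining with '_' (a group/split decomposition; objective: simpler).

-- ===== PORT A =====
def clean_module_name_py (module_name : String) : String :=
  let text := PySem.Chars.lower (PySem.Chars.strip (if module_name == "" then "settings" else module_name).toList)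
  let st := text.foldl (fun (acc : List Char × Bool) ch =>
      if PySem.Chars.isalnum ch then (acc.1 ++ [ch], false)
      else if acc.2 = false then (acc.1 ++ ['_'], true) else (acc.1, true))
    (([] : List Char), false)
  let name := PySem.Chars.stripChars st.1 ['_']
  if name.isEmpty then "settings" else String.mk name

-- ===== PORT B =====
def clean_module_name_py_alt (module_name : String) : String :=
  let text := PySem.Chars.lower (PySem.Chars.strip (if module_name == "" then "settings" else module_name).toList)
  let masked := text.map (fun ch => if PySem.Chars.isalnum ch then ch else ' ')
  let tokens := PySem.Chars.split₀ masked
  let name := PySem.Chars.join ['_'] tokens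
  if name.isEmpty then "settings" else String.mk name

-- ===== PRECONDITION & SPEC =====
def Spec_clean_module_name_py (module_name : String) (out : String) : Prop := out = clean_module_name_py_alt module_name
instance (module_name : String) (out : String) : Decidable (Spec_clean_module_name_py module_name out) := by unfold Spec_clean_module_name_py; infer_instance

-- ===== CLAIM (what is proved, stated in full; the proofs are below) =====
def Claim_equal_clean_module_name_py : Prop := ∀ (module_name : String), Dom_clean_module_name_py module_name → Spec_clean_module_name_py module_name (clean_module_name_py module_name)

-- ===== LEMMAS AND PROOFS =====

-- A's loop as a structural recursion (output list only; the Bool is the prev_sep flag).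
def pvF : List Char → Bool → List Char
  | [], _ => []
  | c :: r, prev =>
    if PySem.Chars.isalnum c then c :: pvF r false
    else if prev then pvF r true else '_' :: pvF r true

-- the maximal alphanumeric runs of a string
def pvWords : List Char → List (List Char)
  | [] => []
  | c :: r =>
    if PySem.Chars.isalnum c then
      match r with
      | [] => [[c]]
      | d :: _ =>
        if PySem.Chars.isalnum d then ((c :: (pvWords r).headI) :: (pvWords r).tail)
        else [c] :: pvWords r
    else pvWords r

def pvStartsAl : List Char → Bool
  | [] => false
  | c :: _ => PySem.Chars.isalnum c

def pvQ (c : Char) : Bool := c == '_'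

def pvRstrip (s : List Char) : List Char := (List.dropWhile pvQ s.reverse).reverse

theorem pv_alnum_not_space (c : Char) (h : PySem.Chars.isalnum c = true) :
    PySem.Chars.isspace c = false := by
  simp only [PySem.Chars.isalnum, PySem.Chars.isalpha, PySem.Chars.isupper, PySem.Chars.islower,
    PySem.Chars.isdigit, Char.le_def, UInt32.le_iff_toNat_le, Bool.or_eq_true, Bool.and_eq_true,
    decide_eq_true_eq] at h
  simp only [PySem.Chars.isspace]
  have hn : c.toNat = c.val.toNat := rfl
  simp only [← hn] at h ⊢
  have h0 : ('A':Char).val.toNat = 65 ∧ ('Z':Char).val.toNat = 90 ∧ ('a':Char).val.toNat = 97 ∧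
    ('z':Char).val.toNat = 122 ∧ ('0':Char).val.toNat = 48 ∧ ('9':Char).val.toNat = 57 := by decide
  obtain ⟨a1,a2,a3,a4,a5,a6⟩ := h0
  simp only [hn, a1,a2,a3,a4,a5,a6] at h
  simp only [Bool.or_eq_false_iff, Bool.and_eq_false_iff, decide_eq_false_iff_not]
  omega

theorem pv_alnum_not_us (c : Char) (h : PySem.Chars.isalnum c = true) : pvQ c = false := by
  simp only [pvQ, beq_eq_false_iff_ne, ne_eq]
  intro rfl_h
  subst rfl_h
  exact absurd h (by decide)

theorem pv_foldA (t : List Char) (acc : List Char) (prev : Bool) :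
    (t.foldl (fun (acc : List Char × Bool) ch =>
      if PySem.Chars.isalnum ch then (acc.1 ++ [ch], false)
      else if acc.2 = false then (acc.1 ++ ['_'], true) else (acc.1, true)) (acc, prev)).1
    = acc ++ pvF t prev := by
  induction t generalizing acc prev with
  | nil => simp [pvF]
  | cons c r ih =>
    by_cases h : PySem.Chars.isalnum c = true
    · simp [pvF, h, List.foldl_cons, ih]
    · simp only [Bool.not_eq_true] at h
      cases prev with
      | false => simp [pvF, h, List.foldl_cons, ih]
      | true => simp [pvF, h, List.foldl_cons, ih]

theorem pv_words_ne_nil (t : List Char) (h : pvStartsAl t = true) : pvWords t ≠ [] := by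
  cases t with
  | nil => simp [pvStartsAl] at h
  | cons c r =>
    simp only [pvStartsAl] at h
    cases r with
    | nil => simp [pvWords, h]
    | cons d r' =>
      by_cases hd : PySem.Chars.isalnum d = true
      · simp [pvWords, h, hd]
      · simp only [Bool.not_eq_true] at hd
        simp [pvWords, h, hd]

theorem pv_words_cons (t : List Char) (h : pvStartsAl t = true) :
    (pvWords t).headI :: (pvWords t).tail = pvWords t := by
  have := pv_words_ne_nil t h
  cases hw : pvWords t with
  | nil => exact absurd hw this
  | cons a b => rfl

theorem pv_words_eq_cons (c d : Char) (r' : List Char) (hc : PySem.Chars.isalnum c = true)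
    (hd : PySem.Chars.isalnum d = true) :
    pvWords (c :: d :: r') = (c :: (pvWords (d :: r')).headI) :: (pvWords (d :: r')).tail := by
  simp [pvWords, hc, hd]

theorem pv_words_eq_new (c d : Char) (r' : List Char) (hc : PySem.Chars.isalnum c = true)
    (hd : PySem.Chars.isalnum d = false) :
    pvWords (c :: d :: r') = [c] :: pvWords (d :: r') := by
  simp [pvWords, hc, hd]

theorem pv_words_nonempty (t : List Char) : ∀ w ∈ pvWords t, w ≠ [] := by
  induction t with
  | nil => simp [pvWords]
  | cons c r ih =>
    by_cases h : PySem.Chars.isalnum c = true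
    · cases r with
      | nil => simp [pvWords, h]
      | cons d r' =>
        by_cases hd : PySem.Chars.isalnum d = true
        · rw [pv_words_eq_cons c d r' h hd]
          intro w hw
          rcases List.mem_cons.mp hw with rfl | hw'
          · simp
          · exact ih w (List.mem_of_mem_tail hw')
        · simp only [Bool.not_eq_true] at hd
          rw [pv_words_eq_new c d r' h hd]
          intro w hw
          rcases List.mem_cons.mp hw with rfl | hw'
          · simp
          · exact ih w hw'
    · simp only [Bool.not_eq_true] at h
      simpa [pvWords, h] using ih

theorem pv_join_cons_word (c : Char) (h : List Char) (tl : List (List Char)) :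
    PySem.Chars.join ['_'] ((c :: h) :: tl) = c :: PySem.Chars.join ['_'] (h :: tl) := by
  cases tl with
  | nil => simp [PySem.Chars.join_singleton]
  | cons w tl' => simp [PySem.Chars.join_cons_cons]

theorem pv_join_ne_nil (w : List Char) (ws : List (List Char)) (h : w ≠ []) :
    PySem.Chars.join ['_'] (w :: ws) ≠ [] := by
  cases ws with
  | nil => simpa [PySem.Chars.join_singleton] using h
  | cons v ws' => simp [PySem.Chars.join_cons_cons, h]

-- split₀.go on the masked text, characterised by pvWords
theorem pv_split_go (t : List Char) (cur : List Char) (acc : List (List Char)) :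
    PySem.Chars.split₀.go (t.map (fun ch => if PySem.Chars.isalnum ch then ch else ' ')) cur acc
    = acc.reverse ++ (if pvStartsAl t then (cur.reverse ++ (pvWords t).headI) :: (pvWords t).tail
        else (if cur.isEmpty then [] else [cur.reverse]) ++ pvWords t) := by
  induction t generalizing cur acc with
  | nil =>
    simp only [List.map_nil, PySem.Chars.split₀.go, pvStartsAl, pvWords, Bool.false_eq_true,
      if_false, List.append_nil]
    by_cases hc : cur.isEmpty
    · simp [hc]
    · simp [hc]
  | cons c r ih =>
    rw [List.map_cons]
    by_cases h : PySem.Chars.isalnum c = true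
    · have hmask : (if PySem.Chars.isalnum c then c else ' ') = c := by simp [h]
      rw [hmask]
      have hns : PySem.Chars.isspace c = false := pv_alnum_not_space c h
      rw [show PySem.Chars.split₀.go (c :: r.map (fun ch => if PySem.Chars.isalnum ch then ch else ' ')) cur acc
          = PySem.Chars.split₀.go (r.map (fun ch => if PySem.Chars.isalnum ch then ch else ' ')) (c :: cur) acc by
        simp [PySem.Chars.split₀.go, hns]]
      rw [ih (c :: cur) acc]
      cases r with
      | nil =>
        simp [pvStartsAl, pvWords, h]
      | cons d r' =>
        by_cases hd : PySem.Chars.isalnum d = true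
        · rw [pv_words_eq_cons c d r' h hd]
          simp [pvStartsAl, h, hd, List.append_assoc]
        · simp only [Bool.not_eq_true] at hd
          rw [pv_words_eq_new c d r' h hd]
          simp [pvStartsAl, h, hd]
    · simp only [Bool.not_eq_true] at h
      have hmask : (if PySem.Chars.isalnum c then c else ' ') = ' ' := by simp [h]
      rw [hmask]
      have hsp : PySem.Chars.isspace ' ' = true := by decide
      have hw : pvWords (c :: r) = pvWords r := by simp [pvWords, h]
      have hws : ∀ acc', PySem.Chars.split₀.go
          (r.map (fun ch => if PySem.Chars.isalnum ch then ch else ' ')) [] acc'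
          = acc'.reverse ++ pvWords r := by
        intro acc'
        rw [ih [] acc']
        by_cases hst : pvStartsAl r = true
        · simp [hst, pv_words_cons r hst]
        · simp only [Bool.not_eq_true] at hst
          simp [hst]
      by_cases hc : cur.isEmpty
      · rw [show PySem.Chars.split₀.go (' ' :: r.map (fun ch => if PySem.Chars.isalnum ch then ch else ' ')) cur acc
            = PySem.Chars.split₀.go (r.map (fun ch => if PySem.Chars.isalnum ch then ch else ' ')) [] acc by
          simp [PySem.Chars.split₀.go, hsp, hc]]
        rw [hws acc, hw]
        simp [pvStartsAl, h, hc]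
      · rw [show PySem.Chars.split₀.go (' ' :: r.map (fun ch => if PySem.Chars.isalnum ch then ch else ' ')) cur acc
            = PySem.Chars.split₀.go (r.map (fun ch => if PySem.Chars.isalnum ch then ch else ' ')) [] (cur.reverse :: acc) by
          simp [PySem.Chars.split₀.go, hsp, hc]]
        rw [hws (cur.reverse :: acc), hw]
        simp [pvStartsAl, h, hc]

theorem pv_split0_masked (t : List Char) :
    PySem.Chars.split₀ (t.map (fun ch => if PySem.Chars.isalnum ch then ch else ' ')) = pvWords t := by
  rw [PySem.Chars.split₀, pv_split_go t [] []]
  by_cases hst : pvStartsAl t = true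
  · simp [hst, pv_words_cons t hst]
  · simp only [Bool.not_eq_true] at hst
    simp [hst]

theorem pv_rstrip_cons_not (c : Char) (s : List Char) (h : pvQ c = false) :
    pvRstrip (c :: s) = c :: pvRstrip s := by
  unfold pvRstrip
  rw [List.reverse_cons, List.dropWhile_append]
  split_ifs with he
  · simp only [List.isEmpty_iff] at he
    simp [he, List.dropWhile, h]
  · simp

theorem pv_rstrip_cons_q (c : Char) (s : List Char) (h : pvQ c = true) :
    pvRstrip (c :: s) = if pvRstrip s = [] then [] else c :: pvRstrip s := by
  unfold pvRstrip
  rw [List.reverse_cons, List.dropWhile_append]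
  by_cases he : List.dropWhile pvQ s.reverse = []
  · simp [he, List.dropWhile, h]
  · simp [he, List.isEmpty_iff]

theorem pvF_true_head (t : List Char) :
    pvF t true = [] ∨ ∃ c rest, pvF t true = c :: rest ∧ PySem.Chars.isalnum c = true := by
  induction t with
  | nil => left; rfl
  | cons c r ih =>
    by_cases h : PySem.Chars.isalnum c = true
    · right
      refine ⟨c, pvF r false, ?_, h⟩
      simp [pvF, h]
    · simp only [Bool.not_eq_true] at h
      simpa [pvF, h] using ih

theorem pvF_false_eq (t : List Char) :
    pvF t false = (if pvStartsAl t = false ∧ t ≠ [] then '_' :: pvF t true else pvF t true) := by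
  cases t with
  | nil => simp [pvF]
  | cons c r =>
    by_cases h : PySem.Chars.isalnum c = true
    · simp [pvF, pvStartsAl, h]
    · simp only [Bool.not_eq_true] at h
      simp [pvF, pvStartsAl, h]

theorem pv_words_join_nil_iff (t : List Char) :
    PySem.Chars.join ['_'] (pvWords t) = [] ↔ pvWords t = [] := by
  cases hw : pvWords t with
  | nil => simp [PySem.Chars.join_nil]
  | cons w ws' =>
    have hwne : w ≠ [] := pv_words_nonempty t w (by rw [hw]; exact List.mem_cons_self)
    simp [pv_join_ne_nil w ws' hwne]

theorem pv_C1 (t : List Char) :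
    pvRstrip (pvF t true) = PySem.Chars.join ['_'] (pvWords t) := by
  induction t with
  | nil => simp [pvF, pvWords, pvRstrip, PySem.Chars.join_nil]
  | cons c r ih =>
    by_cases h : PySem.Chars.isalnum c = true
    · have hstep : pvF (c :: r) true = c :: pvF r false := by simp [pvF, h]
      rw [hstep, pv_rstrip_cons_not c _ (pv_alnum_not_us c h), pvF_false_eq r]
      by_cases hcond : pvStartsAl r = false ∧ r ≠ []
      · obtain ⟨hst, hne⟩ := hcond
        cases r with
        | nil => exact absurd rfl hne
        | cons d r' =>
          have hd : PySem.Chars.isalnum d = false := by simpa [pvStartsAl] using hst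
          rw [if_pos ⟨hst, hne⟩, pv_rstrip_cons_q '_' _ (by simp [pvQ]), ih,
            pv_words_eq_new c d r' h hd]
          by_cases hwnil : pvWords (d :: r') = []
          · rw [if_pos ((pv_words_join_nil_iff (d :: r')).mpr hwnil), hwnil,
              PySem.Chars.join_singleton]
          · rw [if_neg (fun hj => hwnil ((pv_words_join_nil_iff (d :: r')).mp hj))]
            cases hw : pvWords (d :: r') with
            | nil => exact absurd hw hwnil
            | cons w ws' =>
              rw [PySem.Chars.join_cons_cons]
              simp
      · rw [if_neg hcond]
        cases r with
        | nil =>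
          simp [pvF, pvRstrip, pvWords, h, PySem.Chars.join_singleton]
        | cons d r' =>
          have hd : PySem.Chars.isalnum d = true := by
            rcases not_and_or.mp hcond with hst | hne
            · simpa [pvStartsAl] using hst
            · exact absurd (by simp) hne
          rw [ih, pv_words_eq_cons c d r' h hd, pv_join_cons_word,
            pv_words_cons (d :: r') (by simp [pvStartsAl, hd])]
    · simp only [Bool.not_eq_true] at h
      have hstep : pvF (c :: r) true = pvF r true := by simp [pvF, h]
      have hw : pvWords (c :: r) = pvWords r := by simp [pvWords, h]
      rw [hstep, hw, ih]

theorem pv_drop_true (t : List Char) :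
    List.dropWhile pvQ (pvF t true) = pvF t true := by
  rcases pvF_true_head t with h | ⟨c, rest, h, hc⟩
  · simp [h]
  · rw [h, List.dropWhile_cons_of_neg (by simp [pv_alnum_not_us c hc])]

theorem pv_drop_false (t : List Char) :
    List.dropWhile pvQ (pvF t false) = pvF t true := by
  rw [pvF_false_eq]
  split_ifs with h
  · rw [List.dropWhile_cons_of_pos (by simp [pvQ])]
    exact pv_drop_true t
  · exact pv_drop_true t

theorem pv_stripChars_eq (s : List Char) :
    PySem.Chars.stripChars s ['_'] = pvRstrip (List.dropWhile pvQ s) := by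
  have hq : (fun c => List.contains ['_'] c) = pvQ := by
    funext c
    simp only [List.contains_cons, List.contains_nil, Bool.or_false, pvQ]
  simp only [PySem.Chars.stripChars, hq, pvRstrip]

theorem pv_main (t : List Char) :
    PySem.Chars.stripChars (pvF t false) ['_']
      = PySem.Chars.join ['_'] (pvWords t) := by
  rw [pv_stripChars_eq, pv_drop_false, pv_C1]

-- ===== VERDICT (by name: the statement is the Claim_ definition above) =====
theorem clean_module_name_py_spec : Claim_equal_clean_module_name_py := by
  intro module_name _
  unfold Spec_clean_module_name_py clean_module_name_py clean_module_name_py_alt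
  simp only [pv_foldA, List.nil_append, pv_main, pv_split0_masked]
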